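-- pv_equiv track=rewrite | github.com/mayabyte/caveripper | extract_bti.py | average_colors_together
-- ===== SOURCE A (Python) =====
-- def average_colors_together(colors):
--   transparent_color = next(((r,g,b,a) for r,g,b,a in colors if a == 0), None)
--   if transparent_color:
--     # Need to ensure a fully transparent color exists in the final palette if one existed originally.
--     return transparent_color
--
--   r_sum = sum(r for r,g,b,a in colors)
--   g_sum = sum(g for r,g,b,a in colors)
--   b_sum = sum(b for r,g,b,a in colors)
--   a_sum = sum(a for r,g,b,a in colors)
--
--   average_color = (
--     r_sum//len(colors),
--     g_sum//len(colors),
--     b_sum//len(colors),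
--     a_sum//len(colors),
--   )
--
--   return average_color
-- ===== SOURCE B (Python) =====
-- def average_colors_together(colors):
--   r_sum = g_sum = b_sum = a_sum = 0
--   for r, g, b, a in colors:
--     if a == 0:
--       # a fully transparent color must survive into the final palette
--       return (r, g, b, a)
--     r_sum += r
--     g_sum += g
--     b_sum += b
--     a_sum += a
--   n = len(colors)
--   return (r_sum // n, g_sum // n, b_sum // n, a_sum // n)
-- ===== Notes on version B (the rewrite author's own statement) =====
-- stated objective: simpler
-- what changed: Replaced the five separate scans (a generator hunting for a transparent color plus four sum() comprehensions) by one loop that early-returns on the first transparent color and otherwise accumulates all four channel sums in a single pass.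
import Mathlib
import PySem

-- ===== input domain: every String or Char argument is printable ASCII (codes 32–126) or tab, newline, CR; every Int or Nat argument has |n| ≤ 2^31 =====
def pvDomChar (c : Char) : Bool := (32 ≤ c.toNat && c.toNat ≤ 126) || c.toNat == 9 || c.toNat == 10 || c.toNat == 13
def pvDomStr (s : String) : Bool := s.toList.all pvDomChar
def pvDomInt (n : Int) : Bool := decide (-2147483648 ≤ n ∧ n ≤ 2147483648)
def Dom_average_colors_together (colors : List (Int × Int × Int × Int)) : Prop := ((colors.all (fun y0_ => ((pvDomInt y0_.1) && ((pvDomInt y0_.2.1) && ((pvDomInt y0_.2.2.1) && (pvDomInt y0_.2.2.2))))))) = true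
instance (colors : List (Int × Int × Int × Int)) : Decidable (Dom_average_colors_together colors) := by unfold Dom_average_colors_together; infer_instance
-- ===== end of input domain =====

-- B fuses A's five scans (transparent search + four sum comprehensions) into one loop
-- with four accumulators and an early return (objective: simpler, one pass).

-- ===== PORT A =====
def average_colors_together (colors : List (Int × Int × Int × Int)) : Int × Int × Int × Int :=
  -- next(((r,g,b,a) for r,g,b,a in colors if a == 0), None)
  match colors.find? (fun c => c.2.2.2 == 0) with
  | some c => c            -- a nonempty tuple is truthy, so `if transparent_color:` fires
  | none =>
    let r_sum := (colors.map (fun c => c.1)).sum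
    let g_sum := (colors.map (fun c => c.2.1)).sum
    let b_sum := (colors.map (fun c => c.2.2.1)).sum
    let a_sum := (colors.map (fun c => c.2.2.2)).sum
    (PySem.Int.floordiv r_sum (colors.length : Int),
     PySem.Int.floordiv g_sum (colors.length : Int),
     PySem.Int.floordiv b_sum (colors.length : Int),
     PySem.Int.floordiv a_sum (colors.length : Int))

-- ===== PORT B =====
-- the for-loop of Source B: early return on a == 0, otherwise accumulate; n = len(colors)
def avgLoop (n : Int) : List (Int × Int × Int × Int) → Int → Int → Int → Int → Int × Int × Int × Int
  | [], rs, gs, bs, as_ =>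
    (PySem.Int.floordiv rs n, PySem.Int.floordiv gs n,
     PySem.Int.floordiv bs n, PySem.Int.floordiv as_ n)
  | (r, g, b, a) :: rest, rs, gs, bs, as_ =>
    if a == 0 then (r, g, b, a)
    else avgLoop n rest (rs + r) (gs + g) (bs + b) (as_ + a)

def average_colors_together_alt (colors : List (Int × Int × Int × Int)) : Int × Int × Int × Int :=
  avgLoop (colors.length : Int) colors 0 0 0 0

-- ===== PRECONDITION & SPEC =====
-- Pre_ excludes only the empty list, on which both Pythons raise ZeroDivisionError.
def Pre_average_colors_together (colors : List (Int × Int × Int × Int)) : Prop := colors ≠ []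
instance (colors : List (Int × Int × Int × Int)) : Decidable (Pre_average_colors_together colors) := by unfold Pre_average_colors_together; infer_instance
def pvWitness_average_colors_together : (List (Int × Int × Int × Int)) := [(1, 2, 3, 255), (3, 4, 5, 128)]

def Spec_average_colors_together (colors : List (Int × Int × Int × Int)) (out : Int × Int × Int × Int) : Prop := out = average_colors_together_alt colors
instance (colors : List (Int × Int × Int × Int)) (out : Int × Int × Int × Int) : Decidable (Spec_average_colors_together colors out) := by unfold Spec_average_colors_together; infer_instance

-- ===== CLAIM (what is proved, stated in full; the proofs are below) =====
def Claim_equal_average_colors_together : Prop := ∀ (colors : List (Int × Int × Int × Int)), Dom_average_colors_together colors → Pre_average_colors_together colors → Spec_average_colors_together colors (average_colors_together colors)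

-- ===== LEMMAS AND PROOFS =====
-- Loop invariant: avgLoop with accumulators equals "first transparent color, else
-- floordiv of (accumulator + remaining channel sums) by n".
theorem avgLoop_eq (n : Int) (colors : List (Int × Int × Int × Int))
    (rs gs bs as_ : Int) :
    avgLoop n colors rs gs bs as_ =
      match colors.find? (fun c => c.2.2.2 == 0) with
      | some c => c
      | none =>
        (PySem.Int.floordiv (rs + (colors.map (fun c => c.1)).sum) n,
         PySem.Int.floordiv (gs + (colors.map (fun c => c.2.1)).sum) n,
         PySem.Int.floordiv (bs + (colors.map (fun c => c.2.2.1)).sum) n,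
         PySem.Int.floordiv (as_ + (colors.map (fun c => c.2.2.2)).sum) n) := by
  induction colors generalizing rs gs bs as_ with
  | nil => simp [avgLoop]
  | cons hd tl ih =>
    obtain ⟨r, g, b, a⟩ := hd
    by_cases ha : a = 0
    · simp [avgLoop, ha, List.find?]
    · have ha' : (a == 0) = false := by simpa using ha
      simp only [avgLoop, List.find?, ha', List.map_cons, List.sum_cons]
      rw [ih]
      cases List.find? (fun c => c.2.2.2 == 0) tl <;>
        simp [add_assoc]

-- ===== VERDICT (by name: the statement is the Claim_ definition above) =====
theorem average_colors_together_spec : Claim_equal_average_colors_together := by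
  intro colors _ _
  unfold Spec_average_colors_together average_colors_together average_colors_together_alt
  rw [avgLoop_eq]
  cases List.find? (fun c => c.2.2.2 == 0) colors <;> simp
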